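-- pv_equiv track=rewrite | github.com/PetterPet01/NVIDIATrack3-MR | VADAR/engine/engine_utils.py | untab
-- ===== SOURCE A (Python) =====
-- def untab(text):
--     lines = text.split("\n")
--     untabbed_lines = []
--     for line in lines:
--         if line.startswith("\t"):
--             untabbed_lines.append(line[1:])
--         elif line.startswith("    "):
--             untabbed_lines.append(line[4:])
--         else:
--             untabbed_lines.append(line)
--     untabbed_text = "\n".join(untabbed_lines)
--     return untabbed_text
-- ===== SOURCE B (Python) =====
-- def untab(text):
--     # One pass over the characters: at each line start drop one tab or a
--     # 4-space indent, then copy the rest of the line verbatim.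
--     out = []
--     i = 0
--     n = len(text)
--     while True:
--         # at a line start: skip one level of indentation
--         if i < n and text[i] == '\t':
--             i += 1
--         elif text.startswith('    ', i):
--             i += 4
--         # copy the remainder of the line
--         while i < n and text[i] != '\n':
--             out.append(text[i])
--             i += 1
--         if i == n:
--             break
--         out.append('\n')
--         i += 1
--     return ''.join(out)
-- ===== Notes on version B (the rewrite author's own statement) =====
-- stated objective: alternative
-- what changed: Replaces split-into-lines / per-line branch / join with a single character-level pass over the whole text that drops one tab or a 4-space indent at each line start and copies everything else verbatim.
import Mathlib
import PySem

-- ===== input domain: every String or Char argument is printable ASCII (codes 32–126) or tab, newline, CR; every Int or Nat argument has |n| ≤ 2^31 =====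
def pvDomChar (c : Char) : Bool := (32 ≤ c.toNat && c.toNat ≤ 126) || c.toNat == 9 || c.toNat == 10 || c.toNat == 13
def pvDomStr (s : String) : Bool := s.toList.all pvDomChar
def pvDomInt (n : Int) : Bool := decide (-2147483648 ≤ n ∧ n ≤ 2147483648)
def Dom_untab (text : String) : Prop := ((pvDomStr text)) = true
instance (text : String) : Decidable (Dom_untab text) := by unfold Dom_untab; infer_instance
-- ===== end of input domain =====

-- B replaces split-into-lines / per-line branch / join by a single character-level pass
-- that drops one tab or a 4-space indent at each line start (objective: alternative).

-- ===== PORT A =====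
def untab (text : String) : String :=
  let lines := (PySem.Str.split? text "\n").getD []
  let untabbed_lines := lines.foldl (fun acc line =>
    if PySem.Str.startswith line "\t" then acc ++ [PySem.Str.slice line (some 1) none]
    else if PySem.Str.startswith line "    " then acc ++ [PySem.Str.slice line (some 4) none]
    else acc ++ [line]) []
  PySem.Str.join "\n" untabbed_lines

-- ===== PORT B =====
-- skip one level of indentation at a line start (B's first if/elif)
def skipIndentB (cs : List Char) : List Char :=
  match cs with
  | '\t' :: rest => rest
  | ' ' :: ' ' :: ' ' :: ' ' :: rest => rest
  | _ => cs

theorem skipIndentB_length_le (cs : List Char) : (skipIndentB cs).length ≤ cs.length := by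
  unfold skipIndentB; split <;> simp <;> omega

-- copy the text; after each newline, skip the next line's indentation (B's inner loop)
def untabCopy : List Char → List Char
  | [] => []
  | c :: rest =>
    if c = '\n' then '\n' :: untabCopy (skipIndentB rest)
    else c :: untabCopy rest
termination_by cs => cs.length
decreasing_by
  · exact Nat.lt_succ_of_le (skipIndentB_length_le rest)
  · simp

def untab_alt (text : String) : String :=
  String.ofList (untabCopy (skipIndentB text.toList))

-- ===== PRECONDITION & SPEC =====
def Spec_untab (text : String) (out : String) : Prop := out = untab_alt text
instance (text : String) (out : String) : Decidable (Spec_untab text out) := by unfold Spec_untab; infer_instance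

-- ===== CLAIM (what is proved, stated in full; the proofs are below) =====
def Claim_equal_untab : Prop := ∀ (text : String), Dom_untab text → Spec_untab text (untab text)

-- ===== LEMMAS AND PROOFS =====

-- A's per-line transformation at the character-list level
def fL (l : List Char) : List Char :=
  if PySem.Chars.startswith l ['\t'] then PySem.Chars.slice l (some 1) none
  else if PySem.Chars.startswith l [' ', ' ', ' ', ' '] then PySem.Chars.slice l (some 4) none
  else l

-- first line and remaining lines of a '\n'-split, as simple structural recursion
def splitAux : List Char → List Char × List (List Char)
  | [] => ([], [])
  | c :: rest =>
    if c = '\n' then ([], (splitAux rest).1 :: (splitAux rest).2)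
    else (c :: (splitAux rest).1, (splitAux rest).2)

-- the tail lines, each untabbed and preceded by '\n'
def Jtail (ls : List (List Char)) : List Char := (ls.map (fun l => '\n' :: fL l)).flatten

theorem go_spec : ∀ (fuel : Nat) (l cur : List Char) (acc : List (List Char)),
    l.length ≤ fuel →
    PySem.Chars.splitOn.go ['\n'] fuel l cur acc =
      acc.reverse ++ (cur.reverse ++ (splitAux l).1) :: (splitAux l).2 := by
  intro fuel
  induction fuel with
  | zero =>
    intro l cur acc h
    have : l = [] := List.eq_nil_of_length_eq_zero (Nat.le_zero.mp h)
    subst this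
    simp [PySem.Chars.splitOn.go, splitAux]
  | succ fuel ih =>
    intro l cur acc h
    cases l with
    | nil => simp [PySem.Chars.splitOn.go, splitAux]
    | cons c rest =>
      by_cases hc : c = '\n'
      · subst hc
        rw [PySem.Chars.splitOn.go]
        rw [if_pos (show (['\n'].isPrefixOf ('\n'::rest)) = true by simp [List.isPrefixOf])]
        have hd : List.drop (['\n'] : List Char).length ('\n'::rest) = rest := rfl
        rw [hd, ih rest [] _ (by simp at h; omega)]
        simp [splitAux]
      · rw [PySem.Chars.splitOn.go]
        rw [if_neg (show ¬ (['\n'].isPrefixOf (c::rest)) = true by simp [List.isPrefixOf]; exact fun h => hc h.symm)]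
        rw [ih rest (c :: cur) acc (by simp at h; omega)]
        simp [splitAux, hc]

theorem splitOn_eq (cs : List Char) :
    PySem.Chars.splitOn cs ['\n'] = (splitAux cs).1 :: (splitAux cs).2 := by
  unfold PySem.Chars.splitOn
  rw [go_spec (cs.length + 1) cs [] [] (by omega)]
  simp

theorem splitAux_fst_prefix (cs : List Char) : (splitAux cs).1 <+: cs := by
  induction cs with
  | nil => simp [splitAux]
  | cons c rest ih =>
    by_cases hc : c = '\n'
    · simp [splitAux, hc]
    · simpa [splitAux, hc, List.cons_prefix_cons] using ih

theorem fL_skip (cs : List Char) :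
    splitAux (skipIndentB cs) = (fL (splitAux cs).1, (splitAux cs).2) := by
  unfold skipIndentB
  split
  · -- cs = '\t' :: rest
    rename_i rest
    simp [splitAux, fL, PySem.Chars.startswith, List.isPrefixOf, PySem.List.slice_from_one]
  · rename_i rest
    have hs : splitAux (' '::' '::' '::' '::rest) = (' '::' '::' '::' '::(splitAux rest).1, (splitAux rest).2) := by
      simp [splitAux]
    rw [hs]
    have hfl : fL (' '::' '::' '::' '::(splitAux rest).1) = (splitAux rest).1 := by
      unfold fL
      rw [if_neg (by simp [PySem.Chars.startswith, List.isPrefixOf]), if_pos (by simp [PySem.Chars.startswith, List.isPrefixOf])]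
      rw [PySem.Chars.slice_eq_listSlice, PySem.List.slice_from _ (by norm_num)]
      rfl
    rw [hfl]
  · rename_i h1 h2
    have hpre := splitAux_fst_prefix cs
    unfold fL
    rw [if_neg, if_neg]
    · intro hsw
      obtain ⟨t, ht⟩ := ((PySem.Chars.startswith_iff _ _).mp hsw).trans hpre
      exact h2 _ ht.symm
    · intro hsw
      obtain ⟨t, ht⟩ := ((PySem.Chars.startswith_iff _ _).mp hsw).trans hpre
      exact h1 _ ht.symm

theorem copy_spec : ∀ (n : Nat) (cs : List Char), cs.length ≤ n →
    untabCopy cs = (splitAux cs).1 ++ Jtail (splitAux cs).2 := by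
  intro n
  induction n with
  | zero =>
    intro cs h
    have : cs = [] := List.eq_nil_of_length_eq_zero (Nat.le_zero.mp h)
    subst this
    simp [untabCopy, splitAux, Jtail]
  | succ n ih =>
    intro cs h
    cases cs with
    | nil => simp [untabCopy, splitAux, Jtail]
    | cons c rest =>
      simp only [List.length_cons] at h
      by_cases hc : c = '\n'
      · subst hc
        rw [untabCopy, if_pos rfl]
        rw [ih (skipIndentB rest) ((skipIndentB_length_le rest).trans (by omega))]
        rw [fL_skip]
        simp [splitAux, Jtail]
      · rw [untabCopy, if_neg hc, ih rest (by omega)]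
        simp [splitAux, hc]

theorem join_map_fL (h : List Char) (t : List (List Char)) :
    PySem.Chars.join ['\n'] ((h :: t).map fL) = fL h ++ Jtail t := by
  induction t generalizing h with
  | nil => simp [PySem.Chars.join_singleton, Jtail]
  | cons b t ih =>
    rw [List.map_cons, List.map_cons, PySem.Chars.join_cons_cons, ← List.map_cons, ih b]
    simp [Jtail]

-- A's per-line transformation at the String level
def gS (line : String) : String :=
  if PySem.Str.startswith line "\t" then PySem.Str.slice line (some 1) none
  else if PySem.Str.startswith line "    " then PySem.Str.slice line (some 4) none
  else line

theorem gS_toList (l : List Char) : (gS (String.ofList l)).toList = fL l := by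
  unfold gS fL
  have h1 : PySem.Str.startswith (String.ofList l) "\t" = PySem.Chars.startswith l ['\t'] := by
    rw [PySem.Str.startswith_eq]; simp
  have h2 : PySem.Str.startswith (String.ofList l) "    " = PySem.Chars.startswith l [' ',' ',' ',' '] := by
    rw [PySem.Str.startswith_eq]; simp
  rw [h1, h2]
  split_ifs <;> simp [PySem.Str.toList_slice]

theorem main_eq (text : String) : untab text = untab_alt text := by
  unfold untab
  have hsplit : (PySem.Str.split? text "\n").getD [] =
      List.map String.ofList ((splitAux text.toList).1 :: (splitAux text.toList).2) := by
    unfold PySem.Str.split?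
    rw [show ("\n" : String).toList = ['\n'] from rfl]
    unfold PySem.Chars.split?
    rw [if_neg (by simp), splitOn_eq]
    rfl
  rw [hsplit]
  have hfun : (fun (acc : List String) line =>
      if PySem.Str.startswith line "\t" then acc ++ [PySem.Str.slice line (some 1) none]
      else if PySem.Str.startswith line "    " then acc ++ [PySem.Str.slice line (some 4) none]
      else acc ++ [line]) = fun acc line => acc ++ [gS line] := by
    funext acc line
    unfold gS
    split_ifs <;> rfl
  rw [hfun]
  dsimp only
  rw [PySem.List.foldl_append_singleton_eq_map]
  apply String.toList_inj.mp
  rw [PySem.Str.toList_join, untab_alt, String.toList_ofList]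
  rw [List.nil_append, List.map_map, List.map_map]
  rw [show ((String.toList ∘ gS) ∘ String.ofList) = fL from funext gS_toList]
  rw [join_map_fL]
  rw [copy_spec (skipIndentB text.toList).length _ le_rfl, fL_skip]
  simp

-- ===== VERDICT (by name: the statement is the Claim_ definition above) =====
theorem untab_spec : Claim_equal_untab := by
  intro text _
  exact main_eq text
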